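-- pv_equiv track=rewrite | github.com/alvaropol/python-project-robot8bit | robot8bit/objects/GameInit.py | generate_objects
-- ===== SOURCE A (Python) =====
-- PLAYER_SIZE = 50
--
-- WALL_SIZE = 50
--
-- def generate_objects(map_info):
--     diamonds = []
--     bombs = []
--     walls = []
--     waters = []
--     for y, row in enumerate(map_info):
--         for x, tile in enumerate(row):
--             if tile == 'D':
--                 diamonds.append((x * PLAYER_SIZE, y * PLAYER_SIZE))
--             elif tile == 'B':
--                 bombs.append((x * PLAYER_SIZE, y * PLAYER_SIZE))
--             elif tile == 'W':
--                 walls.append((x * WALL_SIZE, y * WALL_SIZE))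
--             elif tile == 'A':
--                 waters.append((x * WALL_SIZE, y * WALL_SIZE))
--     return diamonds, bombs, walls, waters
-- ===== SOURCE B (Python) =====
-- PLAYER_SIZE = 50
--
-- WALL_SIZE = 50
--
-- def generate_objects(map_info):
--     diamonds = [(x * 50, y * 50) for y, row in enumerate(map_info) for x, tile in enumerate(row) if tile == 'D']
--     bombs = [(x * 50, y * 50) for y, row in enumerate(map_info) for x, tile in enumerate(row) if tile == 'B']
--     walls = [(x * 50, y * 50) for y, row in enumerate(map_info) for x, tile in enumerate(row) if tile == 'W']
--     waters = [(x * 50, y * 50) for y, row in enumerate(map_info) for x, tile in enumerate(row) if tile == 'A']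
--     return diamonds, bombs, walls, waters
-- ===== Notes on version B (the rewrite author's own statement) =====
-- stated objective: alternative
-- what changed: Replaces the single categorizing pass with if/elif and four mutable accumulators by four independent filtering comprehensions, one per tile kind.
import Mathlib
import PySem

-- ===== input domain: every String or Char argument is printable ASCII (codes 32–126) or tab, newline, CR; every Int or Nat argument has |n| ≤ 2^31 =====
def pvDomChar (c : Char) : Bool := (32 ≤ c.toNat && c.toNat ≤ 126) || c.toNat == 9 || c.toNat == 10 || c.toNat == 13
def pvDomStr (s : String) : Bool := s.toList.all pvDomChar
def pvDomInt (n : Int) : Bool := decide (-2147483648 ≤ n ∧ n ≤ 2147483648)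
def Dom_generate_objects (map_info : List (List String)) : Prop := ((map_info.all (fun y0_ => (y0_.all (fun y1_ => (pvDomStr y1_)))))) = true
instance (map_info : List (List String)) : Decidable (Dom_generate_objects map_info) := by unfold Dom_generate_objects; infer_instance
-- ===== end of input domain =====

-- B: four independent filtering comprehensions instead of A's single categorizing pass (alternative decomposition; same cost).
-- ===== PORT A =====
def generate_objects (map_info : List (List String)) : (List (Int × Int)) × (List (Int × Int)) × (List (Int × Int)) × (List (Int × Int)) :=
  (PySem.List.enumerate map_info).foldl
    (fun s p =>
      (PySem.List.enumerate p.2).foldl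
        (fun t q =>
          if q.2 == "D" then (t.1 ++ [(q.1 * 50, p.1 * 50)], t.2.1, t.2.2.1, t.2.2.2)
          else if q.2 == "B" then (t.1, t.2.1 ++ [(q.1 * 50, p.1 * 50)], t.2.2.1, t.2.2.2)
          else if q.2 == "W" then (t.1, t.2.1, t.2.2.1 ++ [(q.1 * 50, p.1 * 50)], t.2.2.2)
          else if q.2 == "A" then (t.1, t.2.1, t.2.2.1, t.2.2.2 ++ [(q.1 * 50, p.1 * 50)])
          else t) s)
    ([], [], [], [])

-- ===== PORT B =====
-- one filtering scan: the comprehension [(x*50, y*50) for y,row in enumerate(m) for x,tile in enumerate(row) if tile == c]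
def pvFilterTiles (c : String) (map_info : List (List String)) : List (Int × Int) :=
  (PySem.List.enumerate map_info).flatMap
    (fun p => (PySem.List.enumerate p.2).filterMap
      (fun q => if q.2 == c then some (q.1 * 50, p.1 * 50) else none))

def generate_objects_alt (map_info : List (List String)) : (List (Int × Int)) × (List (Int × Int)) × (List (Int × Int)) × (List (Int × Int)) :=
  (pvFilterTiles "D" map_info, pvFilterTiles "B" map_info, pvFilterTiles "W" map_info, pvFilterTiles "A" map_info)

-- ===== PRECONDITION & SPEC =====
def Spec_generate_objects (map_info : List (List String)) (out : (List (Int × Int)) × (List (Int × Int)) × (List (Int × Int)) × (List (Int × Int))) : Prop := out = generate_objects_alt map_info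
instance (map_info : List (List String)) (out : (List (Int × Int)) × (List (Int × Int)) × (List (Int × Int)) × (List (Int × Int))) : Decidable (Spec_generate_objects map_info out) := by unfold Spec_generate_objects; infer_instance

-- ===== CLAIM (what is proved, stated in full; the proofs are below) =====
def Claim_equal_generate_objects : Prop := ∀ (map_info : List (List String)), Dom_generate_objects map_info → Spec_generate_objects map_info (generate_objects map_info)

-- ===== LEMMAS AND PROOFS =====

-- one filtered row, as B's inner filterMap, for a fixed tile character c
def pvRowF (c : String) (yi : Int) (row : List (Int × String)) : List (Int × Int) :=
  row.filterMap (fun q => if q.2 == c then some (q.1 * 50, yi * 50) else none)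

theorem inner_loop (yi : Int) (row : List (Int × String))
    (t : (List (Int × Int)) × (List (Int × Int)) × (List (Int × Int)) × (List (Int × Int))) :
    row.foldl
      (fun t q =>
        if q.2 == "D" then (t.1 ++ [(q.1 * 50, yi * 50)], t.2.1, t.2.2.1, t.2.2.2)
        else if q.2 == "B" then (t.1, t.2.1 ++ [(q.1 * 50, yi * 50)], t.2.2.1, t.2.2.2)
        else if q.2 == "W" then (t.1, t.2.1, t.2.2.1 ++ [(q.1 * 50, yi * 50)], t.2.2.2)
        else if q.2 == "A" then (t.1, t.2.1, t.2.2.1, t.2.2.2 ++ [(q.1 * 50, yi * 50)])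
        else t) t
    = (t.1 ++ pvRowF "D" yi row, t.2.1 ++ pvRowF "B" yi row,
       t.2.2.1 ++ pvRowF "W" yi row, t.2.2.2 ++ pvRowF "A" yi row) := by
  induction row generalizing t with
  | nil => simp [pvRowF]
  | cons q rest ih =>
    simp only [List.foldl_cons]
    rw [ih]
    clear ih
    simp only [pvRowF, List.filterMap_cons]
    split_ifs <;> simp_all [List.append_assoc]

theorem outer_loop (rows : List (Int × List String))
    (t : (List (Int × Int)) × (List (Int × Int)) × (List (Int × Int)) × (List (Int × Int))) :
    rows.foldl
      (fun s p =>
        (PySem.List.enumerate p.2).foldl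
          (fun t q =>
            if q.2 == "D" then (t.1 ++ [(q.1 * 50, p.1 * 50)], t.2.1, t.2.2.1, t.2.2.2)
            else if q.2 == "B" then (t.1, t.2.1 ++ [(q.1 * 50, p.1 * 50)], t.2.2.1, t.2.2.2)
            else if q.2 == "W" then (t.1, t.2.1, t.2.2.1 ++ [(q.1 * 50, p.1 * 50)], t.2.2.2)
            else if q.2 == "A" then (t.1, t.2.1, t.2.2.1, t.2.2.2 ++ [(q.1 * 50, p.1 * 50)])
            else t) s) t
    = (t.1 ++ rows.flatMap (fun p => pvRowF "D" p.1 (PySem.List.enumerate p.2)),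
       t.2.1 ++ rows.flatMap (fun p => pvRowF "B" p.1 (PySem.List.enumerate p.2)),
       t.2.2.1 ++ rows.flatMap (fun p => pvRowF "W" p.1 (PySem.List.enumerate p.2)),
       t.2.2.2 ++ rows.flatMap (fun p => pvRowF "A" p.1 (PySem.List.enumerate p.2))) := by
  induction rows generalizing t with
  | nil => simp
  | cons p rest ih =>
    simp only [List.foldl_cons, List.flatMap_cons]
    rw [inner_loop, ih]
    simp [List.append_assoc]

-- ===== VERDICT (by name: the statement is the Claim_ definition above) =====
theorem generate_objects_spec : Claim_equal_generate_objects := by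
  intro m _
  show generate_objects m = generate_objects_alt m
  unfold generate_objects generate_objects_alt pvFilterTiles
  rw [outer_loop]
  simp [pvRowF]
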